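-- pv_equiv track=rewrite | github.com/dkassin/interview_prep | Live_Interview_Questions.py/karat_2.py | castle_search
-- ===== SOURCE A (Python) =====
-- from collections import Counter
--
-- def castle_search(inst, tr):
--     valid_array = []
--     remove_invalid = []
--     for i in inst:
--         if i[0] != i[1]:
--             remove_invalid.append(i)
--
--     array_of_rooms = [i[1] for i in remove_invalid]
--     dict_of_rooms = Counter(array_of_rooms)
--     for i in dict_of_rooms.items():
--         if i[1] >= 2:
--             valid_array.append(i[0])
--     win_array = []
--     for i in inst:
--         if i[0] in valid_array and i[1] in tr:
--             win_array.append(i[0])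
--     return win_array
-- ===== SOURCE B (Python) =====
-- def castle_search(inst, tr):
--     # A room counts as "entered twice" iff it appears in two adjacent slots
--     # of the sorted list of non-self-loop move targets.
--     targets = sorted(b for a, b in inst if a != b)
--     valid = {x for x, y in zip(targets, targets[1:]) if x == y}
--     traps = set(tr)
--     return [a for a, b in inst if a in valid and b in traps]
-- ===== Notes on version B (the rewrite author's own statement) =====
-- stated objective: faster
-- what changed: Counter-based duplicate detection is replaced by sorting the non-self-loop targets and collecting values that occur in two adjacent slots into a set; the final scan tests both the valid-room and trap memberships via sets instead of scanning lists.
import Mathlib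
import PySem

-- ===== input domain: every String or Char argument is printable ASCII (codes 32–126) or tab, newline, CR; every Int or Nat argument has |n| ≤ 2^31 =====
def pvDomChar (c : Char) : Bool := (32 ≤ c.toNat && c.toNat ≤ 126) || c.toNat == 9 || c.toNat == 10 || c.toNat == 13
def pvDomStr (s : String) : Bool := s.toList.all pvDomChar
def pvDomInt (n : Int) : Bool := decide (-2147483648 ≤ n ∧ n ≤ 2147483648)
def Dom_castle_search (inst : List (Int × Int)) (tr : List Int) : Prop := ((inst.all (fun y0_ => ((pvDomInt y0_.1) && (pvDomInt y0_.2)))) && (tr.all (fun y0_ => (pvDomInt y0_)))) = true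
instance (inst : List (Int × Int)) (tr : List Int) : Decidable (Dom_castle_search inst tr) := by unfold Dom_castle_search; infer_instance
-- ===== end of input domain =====

-- B replaces Counter-based duplicate detection with a sort + adjacent-equal-pair scan and set lookups.

-- ===== PORT A =====
def castle_search (inst : List (Int × Int)) (tr : List Int) : List Int :=
  let remove_invalid := inst.foldl (fun acc i => if i.1 ≠ i.2 then acc ++ [i] else acc) []
  let array_of_rooms := remove_invalid.map (fun i => i.2)
  let dict_of_rooms := PySem.Dict.counter array_of_rooms
  let valid_array := dict_of_rooms.items.foldl (fun acc i => if i.2 ≥ 2 then acc ++ [i.1] else acc) []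
  inst.foldl (fun acc i => if valid_array.contains i.1 && tr.contains i.2 then acc ++ [i.1] else acc) []

-- ===== PORT B =====
def castle_search_alt (inst : List (Int × Int)) (tr : List Int) : List Int :=
  let targets := PySem.List.sorted ((inst.filter (fun i => i.1 ≠ i.2)).map (fun i => i.2)) (fun x => x) false
  let valid : PySem.Set Int :=
    PySem.Set.ofList (((targets.zip targets.tail).filter (fun p => p.1 == p.2)).map (fun p => p.1))
  let traps : PySem.Set Int := PySem.Set.ofList tr
  (inst.filter (fun i => valid.contains i.1 && traps.contains i.2)).map (fun i => i.1)

-- ===== PRECONDITION & SPEC =====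
def Spec_castle_search (inst : List (Int × Int)) (tr : List Int) (out : List Int) : Prop := out = castle_search_alt inst tr
instance (inst : List (Int × Int)) (tr : List Int) (out : List Int) : Decidable (Spec_castle_search inst tr out) := by unfold Spec_castle_search; infer_instance

-- ===== CLAIM =====
def Claim_equal_castle_search : Prop := ∀ (inst : List (Int × Int)) (tr : List Int), Dom_castle_search inst tr → Spec_castle_search inst tr (castle_search inst tr)

-- ===== LEMMAS AND PROOFS =====

-- In a ≤-sorted list, a value heads an adjacent equal pair iff it occurs at least twice.
theorem adj_mem (x : Int) (l : List Int) (hs : l.Pairwise (· ≤ ·)) :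
    x ∈ ((l.zip l.tail).filter (fun p => p.1 == p.2)).map Prod.fst ↔ 2 ≤ l.count x := by
  induction l with
  | nil => simp
  | cons a l ih =>
    cases l with
    | nil =>
      simp only [List.tail, List.zip_nil_right, List.filter_nil, List.map_nil,
        List.not_mem_nil, List.count_cons, List.count_nil, false_iff]
      split <;> omega
    | cons b t =>
      have hab : a ≤ b := (List.pairwise_cons.1 hs).1 b (by simp)
      have hbt : (b :: t).Pairwise (· ≤ ·) := (List.pairwise_cons.1 hs).2
      have ih' := ih hbt
      have hzip : ((a :: b :: t).zip (a :: b :: t).tail) = (a, b) :: ((b :: t).zip t) := rfl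
      rw [hzip]
      have htail : (b :: t).tail = t := rfl
      rw [htail] at ih'
      by_cases hx : x = a
      · subst hx
        have hc : (x :: b :: t).count x = (b :: t).count x + 1 := by
          simp [List.count_cons]
        by_cases heq : x = b
        · have h1 : 1 ≤ (b :: t).count x := List.count_pos_iff.2 (by simp [heq])
          simp only [List.filter_cons]
          rw [if_pos (by simpa using heq), hc]
          simp only [List.map_cons, List.mem_cons]
          constructor
          · intro _; omega
          · intro _; exact Or.inl trivial
        · simp only [List.filter_cons]
          rw [if_neg (by simpa using heq), ih', hc]
          constructor
          · intro h2; omega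
          · intro h2
            rcases List.mem_cons.1 (List.count_pos_iff.1
                (show 0 < (b :: t).count x by omega)) with h' | hmt
            · exact absurd h' heq
            · exact absurd (le_antisymm hab ((List.pairwise_cons.1 hbt).1 x hmt)) heq
      · have hcnt : (a :: b :: t).count x = (b :: t).count x := by
          simp [List.count_cons, Ne.symm, hx]
        rw [hcnt, ← ih']
        simp only [List.filter_cons]
        split
        · simp only [List.map_cons, List.mem_cons]
          exact ⟨fun h' => h'.resolve_left hx, Or.inr⟩
        · exact Iff.rfl

theorem validA_mem (rooms : List Int) (x : Int) :
    x ∈ List.map Prod.fst (List.filter (fun p => decide (p.2 ≥ 2)) (PySem.Dict.counter rooms).items)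
      ↔ 2 ≤ rooms.count x := by
  simp only [PySem.Dict.items_counter, List.filter_map, List.map_map, List.mem_map,
    List.mem_filter, PySem.Set.mem_ofList, Function.comp]
  constructor
  · rintro ⟨k, ⟨hk, h2⟩, rfl⟩
    simp at h2
    exact_mod_cast h2
  · intro h
    refine ⟨x, ⟨?_, by simp; exact_mod_cast h⟩, rfl⟩
    exact List.count_pos_iff.1 (by omega)

theorem validB_mem (rooms : List Int) (x : Int) :
    x ∈ PySem.Set.ofList ((((PySem.List.sorted rooms (fun x => x) false).zip
        (PySem.List.sorted rooms (fun x => x) false).tail).filter (fun p => p.1 == p.2)).map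
        (fun p => p.1)) ↔ 2 ≤ rooms.count x := by
  rw [PySem.Set.mem_ofList]
  rw [show (fun p : Int × Int => p.1) = @Prod.fst Int Int from rfl]
  rw [adj_mem _ _ (by simpa using PySem.List.sorted_pairwise rooms (fun x => x))]
  rw [(PySem.List.sorted_perm rooms (fun x => x) false).count_eq]

theorem castle_eq (inst : List (Int × Int)) (tr : List Int) :
    castle_search inst tr = castle_search_alt inst tr := by
  unfold castle_search castle_search_alt
  simp only [PySem.List.foldl_append_ite_eq_filter, PySem.List.foldl_append_ite, List.nil_append]
  rw [show (fun i : Int × Int => i.1) = @Prod.fst Int Int from rfl]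
  refine congrArg _ (List.filter_congr fun i _ => ?_)
  simp only [Bool.decide_eq_true]
  have h1 := (validA_mem (List.map (fun i : Int × Int => i.2)
    (List.filter (fun x => decide (x.1 ≠ x.2)) inst)) i.1)
  have h2 := (validB_mem (List.map (fun i : Int × Int => i.2)
    (List.filter (fun i => decide (i.1 ≠ i.2)) inst)) i.1)
  congr 1
  · rw [Bool.eq_iff_iff]
    simp only [List.contains_iff_mem, PySem.Set.contains]
    rw [h1, h2]
  · rw [Bool.eq_iff_iff]
    simp [PySem.Set.mem_ofList, PySem.Set.contains]

-- ===== VERDICT =====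
theorem castle_search_spec : Claim_equal_castle_search :=
  fun inst tr _ => castle_eq inst tr
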